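-- pv_equiv track=rewrite | github.com/daeyubkang/BOJ_CODINGTEST | 프로그래머스/2/92342. 양궁대회/양궁대회.py | solution
-- ===== SOURCE A (Python) =====
-- from itertools import product
--
-- def solution(n, info):
--     answer = []
--     sumval1 = 0
--     for i,val in enumerate(info):
--         if val>0:
--             sumval1 += 10-i
--     array_length = 10
--     boolean_combinations = list(product([True, False], repeat=array_length))
--     point = 1
--     for combination in boolean_combinations:
--         result = [0 for q in range(11)]
--         target = sumval1
--         target2 = 0
--         n1 = n
--         for i,val in enumerate(combination):
--             if not val:
--                 continue
--             else:
--                 if info[i]+1<=n1: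
--                     n1 -= info[i]+1
--                     if info[i] > 0:
--                         target -= 10-i
--                     target2 += 10-i
--                     result[i] = info[i]+1
--         if n1>0:
--             result[10] = n1
--         if target2-target > point:
--             answer = result
--             point = target2-target
--         elif target2-target == point:
--             if answer and answer == result:
--                 continue
--             elif answer:
--                 for w in range(11):
--                     if answer[10-w] < result[10-w]:
--                         answer = result
--                         break
--                     elif answer[10-w] > result[10-w]:
--                         break
--     if not answer:
--         answer.append(-1)
--     return answer
-- ===== SOURCE B (Python) =====
-- def solution(n, info):
--     sumval1 = 0
--     for i, val in enumerate(info):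
--         if val > 0:
--             sumval1 += 10 - i
--     best = None
--     point = 1
--     result = [0] * 11
--
--     def dfs(i, rem, lion, lost):
--         nonlocal best, point
--         if i == 10:
--             res = result[:10] + [rem if rem > 0 else 0]
--             gap = lion - (sumval1 - lost)
--             if gap > point or (best is not None and gap == point and res[::-1] > best[::-1]):
--                 best = res
--                 point = gap
--             return
--         need = info[i] + 1
--         if need <= rem:
--             result[i] = need
--             dfs(i + 1, rem - need, lion + (10 - i), lost + ((10 - i) if info[i] > 0 else 0))
--             result[i] = 0
--         dfs(i + 1, rem, lion, lost)
--
--     dfs(0, n, 0, 0)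
--     return best if best is not None else [-1]
-- ===== Notes on version B (the rewrite author's own statement) =====
-- stated objective: alternative
-- what changed: Replaces A's materialized list of all 1024 boolean combinations (each re-scored from scratch by an inner loop, then merged by a hand-written index-by-index tie-break loop) with a pruned recursive DFS over ring indices that threads the remaining-arrow budget and both partial scores incrementally and compares tie candidates by one reversed-list lexicographic comparison.
-- outside the precondition, e.g. on solution(5, [2, 1, 1, 1, 0, 0, 0, 0, 0]): A raises IndexError, B raises IndexError
import Mathlib
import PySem

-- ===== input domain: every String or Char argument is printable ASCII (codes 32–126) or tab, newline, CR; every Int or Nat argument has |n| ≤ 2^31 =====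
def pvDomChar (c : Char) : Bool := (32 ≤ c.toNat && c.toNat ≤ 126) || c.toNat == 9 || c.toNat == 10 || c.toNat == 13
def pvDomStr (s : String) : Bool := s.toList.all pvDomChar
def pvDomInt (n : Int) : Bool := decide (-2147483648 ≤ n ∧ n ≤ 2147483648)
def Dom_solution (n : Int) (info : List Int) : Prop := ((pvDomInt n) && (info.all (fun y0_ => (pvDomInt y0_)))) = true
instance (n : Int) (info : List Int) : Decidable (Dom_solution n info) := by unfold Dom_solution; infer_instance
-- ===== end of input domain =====

-- B replaces A's enumeration of all 1024 boolean combinations (each re-scored from scratch,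
-- merged by a hand-written index-by-index tie-break loop) with a budget-pruned recursive DFS
-- that threads the scores incrementally and compares ties by one reversed-list comparison;
-- objective: alternative decomposition (same worst-case cost).

-- ===== PORT A =====

-- 'for i,val in enumerate(info): if val>0: sumval1 += 10-i'
def pvSumA : List Int → Int → Int → Int
  | [], _, acc => acc
  | v :: rest, i, acc => pvSumA rest (i + 1) (if v > 0 then acc + (10 - i) else acc)

-- 'list(product([True, False], repeat=k))'
def pvProd : Nat → List (List Bool)
  | 0 => [[]]
  | k + 1 => (pvProd k).map (fun c => true :: c) ++ (pvProd k).map (fun c => false :: c)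

-- A's inner loop 'for i,val in enumerate(combination)' over state (result, target, target2, n1)
def pvInnerA (info : List Int) : List Bool → Nat → (List Int × Int × Int × Int) → (List Int × Int × Int × Int)
  | [], _, st => st
  | b :: rest, i, (result, target, target2, n1) =>
    if b then
      let v := PySem.List.pyGetD info (i : Int) 0
      if v + 1 ≤ n1 then
        pvInnerA info rest (i + 1)
          (result.set i (v + 1), (if v > 0 then target - (10 - (i : Int)) else target),
            target2 + (10 - (i : Int)), n1 - (v + 1))
      else pvInnerA info rest (i + 1) (result, target, target2, n1)
    else pvInnerA info rest (i + 1) (result, target, target2, n1)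

-- A's tie-break loop 'for w in range(11): …'; returns True iff answer is replaced
def pvCmpLoop (answer result : List Int) (w : Nat) : Bool :=
  if _h : w < 11 then
    let x := PySem.List.pyGetD answer (10 - (w : Int)) 0
    let y := PySem.List.pyGetD result (10 - (w : Int)) 0
    if x < y then true
    else if x > y then false
    else pvCmpLoop answer result (w + 1)
  else false
termination_by 11 - w

-- A's update of (answer, point) by one combination's (result, gap)
def pvUpdA (st : List Int × Int) (rg : List Int × Int) : List Int × Int :=
  if rg.2 > st.2 then (rg.1, rg.2)
  else if rg.2 = st.2 then
    if st.1 ≠ [] ∧ st.1 = rg.1 then st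
    else if st.1 ≠ [] then (if pvCmpLoop st.1 rg.1 0 then (rg.1, st.2) else st)
    else st
  else st

-- the body of A's loop over combinations
def pvStepA (n : Int) (info : List Int) (sumval1 : Int) (st : List Int × Int) (c : List Bool) : List Int × Int :=
  match pvInnerA info c 0 (List.replicate 11 0, sumval1, 0, n) with
  | (result, target, target2, n1) =>
    let result := if n1 > 0 then result.set 10 n1 else result
    pvUpdA st (result, target2 - target)

-- 'if not answer: answer.append(-1); return answer'
def pvFinA (r : List Int × Int) : List Int := if r.1 = [] then [-1] else r.1

def solution (n : Int) (info : List Int) : List Int :=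
  pvFinA (List.foldl (pvStepA n info (pvSumA info 0 0)) ([], 1) (pvProd 10))

-- ===== PORT B =====

def pvSumB : List Int → Int → Int → Int
  | [], _, acc => acc
  | v :: rest, i, acc => pvSumB rest (i + 1) (if v > 0 then acc + (10 - i) else acc)

-- Python's '>' on two lists of ints
def pvListGt : List Int → List Int → Bool
  | _ :: _, [] => true
  | [], _ => false
  | x :: xs, y :: ys => if x > y then true else if x < y then false else pvListGt xs ys

-- B's dfs; the mutable (best, point) pair is threaded as the state s
def pvDfs (info : List Int) (sumval1 : Int) (i : Nat) (rem lion lost : Int) (res : List Int)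
    (s : Option (List Int) × Int) : Option (List Int) × Int :=
  if _h : i < 10 then
    let v := PySem.List.pyGetD info (i : Int) 0
    let need := v + 1
    let s' := if need ≤ rem then
        pvDfs info sumval1 (i + 1) (rem - need) (lion + (10 - (i : Int)))
          (lost + (if v > 0 then 10 - (i : Int) else 0)) (res.set i need) s
      else s
    pvDfs info sumval1 (i + 1) rem lion lost res s'
  else
    let res10 := res.take 10 ++ [if rem > 0 then rem else 0]
    let gap := lion - (sumval1 - lost)
    if gap > s.2 ∨ (s.1.isSome ∧ gap = s.2 ∧ pvListGt res10.reverse ((s.1.getD []).reverse)) then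
      (some res10, gap)
    else s
termination_by 10 - i

-- 'return best if best is not None else [-1]'
def pvFinB (r : Option (List Int) × Int) : List Int :=
  match r.1 with
  | none => [-1]
  | some a => a

def solution_alt (n : Int) (info : List Int) : List Int :=
  pvFinB (pvDfs info (pvSumB info 0 0) 0 n 0 0 (List.replicate 11 0) (none, 1))

-- ===== PRECONDITION & SPEC =====
-- A indexes info[0..9]; on shorter lists Python A raises IndexError, so those inputs are excluded.
def Pre_solution (_n : Int) (info : List Int) : Prop := 10 ≤ info.length
instance (n : Int) (info : List Int) : Decidable (Pre_solution n info) := by unfold Pre_solution; infer_instance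
def pvWitness_solution : Int × List Int := (5, [2, 1, 1, 1, 0, 0, 0, 0, 0, 0, 0])

def Spec_solution (n : Int) (info : List Int) (out : List Int) : Prop := out = solution_alt n info
instance (n : Int) (info : List Int) (out : List Int) : Decidable (Spec_solution n info out) := by unfold Spec_solution; infer_instance

-- ===== CLAIM (what is proved, stated in full; the proofs are below) =====
def Claim_equal_solution : Prop := ∀ (n : Int) (info : List Int), Dom_solution n info → Pre_solution n info → Spec_solution n info (solution n info)

-- ===== LEMMAS AND PROOFS =====

-- B's leaf update, extracted for the proofs
def pvUpdB (s : Option (List Int) × Int) (rg : List Int × Int) : Option (List Int) × Int :=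
  if rg.2 > s.2 ∨ (s.1.isSome ∧ rg.2 = s.2 ∧ pvListGt rg.1.reverse ((s.1.getD []).reverse)) then
    (some rg.1, rg.2)
  else s

-- the (result, gap) A computes for the suffix combination c starting at ring i from B's state
def pvLeaf (info : List Int) (s1 : Int) (i : Nat) (rem lion lost : Int) (res : List Int) (c : List Bool) : List Int × Int :=
  match pvInnerA info c i (res, s1 - lost, lion, rem) with
  | (result, target, target2, n1) => (if n1 > 0 then result.set 10 n1 else result, target2 - target)

def pvCnv (s : Option (List Int) × Int) : List Int × Int := (s.1.getD [], s.2)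

def pvOk (s : Option (List Int) × Int) : Prop := ∀ b, s.1 = some b → b.length = 11

lemma pvSum_eq (info : List Int) : ∀ i acc, pvSumB info i acc = pvSumA info i acc := by
  induction info with
  | nil => intro i acc; rfl
  | cons v rest ih => intro i acc; simp [pvSumA, pvSumB, ih]

lemma pvListGt_irrefl (a : List Int) : pvListGt a a = false := by
  induction a with
  | nil => rfl
  | cons x xs ih => simp [pvListGt, ih]

lemma pvListGt_trans : ∀ a b c : List Int, pvListGt a b = true → pvListGt b c = true → pvListGt a c = true := by
  intro a
  induction a with
  | nil => intro b c h; simp [pvListGt] at h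
  | cons x xs ih =>
    intro b c h1 h2
    cases b with
    | nil => simp [pvListGt] at h2
    | cons y ys =>
      cases c with
      | nil => simp [pvListGt]
      | cons z zs =>
        simp only [pvListGt] at h1 h2 ⊢
        split_ifs at h1 h2 ⊢ <;>
          first
          | rfl
          | omega
          | (exact ih ys zs h1 h2)

-- bridge: A's tie-break loop is Python's reversed-list comparison, on length-11 lists
lemma pvCmp_bridge_aux (a r : List Int) (ha : a.length = 11) (hr : r.length = 11) :
    ∀ (d w : Nat), w + d = 11 →
      pvCmpLoop a r w = pvListGt (r.reverse.drop w) (a.reverse.drop w) := by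
  intro d
  induction d with
  | zero =>
    intro w hw
    have hw' : w = 11 := by omega
    subst hw'
    rw [pvCmpLoop]
    simp [List.drop_eq_nil_of_le, ha, hr, pvListGt]
  | succ d ih =>
    intro w hw
    have hwlt : w < 11 := by omega
    rw [pvCmpLoop]
    rw [dif_pos hwlt]
    have hnn : (0 : Int) ≤ 10 - (w : Int) := by omega
    have hlt : (10 - (w : Int)) < (a.length : Int) := by omega
    have hlt' : (10 - (w : Int)) < (r.length : Int) := by omega
    have hidx : ((10 : Int) - (w : Int)).toNat = 10 - w := by omega
    rw [PySem.List.pyGetD_eq_getElem _ _ hnn hlt, PySem.List.pyGetD_eq_getElem _ _ hnn hlt']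
    have hwa : w < a.reverse.length := by simp [ha]; omega
    have hwr : w < r.reverse.length := by simp [hr]; omega
    rw [List.drop_eq_getElem_cons hwa, List.drop_eq_getElem_cons hwr]
    rw [List.getElem_reverse, List.getElem_reverse]
    have h1 : a.length - 1 - w = 10 - w := by omega
    have h2 : r.length - 1 - w = 10 - w := by omega
    simp only [h1, h2, hidx, pvListGt]
    have hrec := ih (w + 1) (by omega)
    by_cases hxy : a[10 - w] < r[10 - w]
    · simp [hxy]
    · by_cases hyx : a[10 - w] > r[10 - w]
      · simp [hxy, hyx]
      · have he : a[10 - w] = r[10 - w] := by omega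
        simp [he, hrec]

lemma pvCmp_bridge (a r : List Int) (ha : a.length = 11) (hr : r.length = 11) :
    pvCmpLoop a r 0 = pvListGt r.reverse a.reverse := by
  simpa using pvCmp_bridge_aux a r ha hr 11 0 rfl

lemma pvUpd_match (best : Option (List Int)) (pt : Int) (r : List Int) (g : Int)
    (hb : ∀ b, best = some b → b.length = 11) (hr : r.length = 11) :
    pvUpdA (pvCnv (best, pt)) (r, g) = pvCnv (pvUpdB (best, pt) (r, g)) := by
  cases best with
  | none =>
    simp only [pvUpdA, pvUpdB, pvCnv, Option.getD_none, Option.isSome_none]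
    split_ifs <;> first | rfl | omega | simp_all
  | some b =>
    have hbl : b.length = 11 := hb b rfl
    have hbne : b ≠ [] := by intro h; rw [h] at hbl; simp at hbl
    have hbr := pvCmp_bridge b r hbl hr
    simp only [pvUpdA, pvUpdB, pvCnv, Option.getD_some, Option.isSome_some]
    by_cases hgt : g > pt
    · simp [hgt]
    · by_cases heq : g = pt
      · by_cases hbrq : b = r
        · subst hbrq
          simp [heq, hbne, pvListGt_irrefl]
        · by_cases hcmp : pvListGt r.reverse b.reverse = true
          · simp [heq, hbne, hbrq, hbr, hcmp]
          · simp only [Bool.not_eq_true] at hcmp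
            simp [heq, hbne, hbrq, hbr, hcmp]
      · simp [hgt, heq]

lemma pvOk_upd (s : Option (List Int) × Int) (rg : List Int × Int) (hs : pvOk s)
    (hr : rg.1.length = 11) : pvOk (pvUpdB s rg) := by
  unfold pvUpdB
  split_ifs with h
  · intro b hb; cases hb; exact hr
  · exact hs

lemma pvFoldAB (L : List (List Int × Int)) : ∀ s, pvOk s → (∀ r ∈ L, r.1.length = 11) →
    List.foldl pvUpdA (pvCnv s) L = pvCnv (List.foldl pvUpdB s L) ∧ pvOk (List.foldl pvUpdB s L) := by
  induction L with
  | nil => intro s hs _; exact ⟨rfl, hs⟩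
  | cons x L ih =>
    intro s hs hL
    obtain ⟨x1, x2⟩ := x
    obtain ⟨s1', s2'⟩ := s
    have hx : x1.length = 11 := hL (x1, x2) (by simp)
    have h1 := pvUpd_match s1' s2' x1 x2 (fun b hb => hs b hb) hx
    have h2 := pvOk_upd (s1', s2') (x1, x2) hs hx
    simp only [List.foldl_cons, h1]
    exact ih _ h2 (fun r hrm => hL r (by simp [hrm]))

-- absorption: re-folding an already-folded list does not change B's state
def pvAbs (s : Option (List Int) × Int) (x : List Int × Int) : Prop := pvUpdB s x = s

lemma pvAbs_upd_self (s : Option (List Int) × Int) (x : List Int × Int) : pvAbs (pvUpdB s x) x := by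
  unfold pvAbs pvUpdB
  split_ifs with h1 h2
  · exfalso
    simp only [Option.isSome_some, Option.getD_some, pvListGt_irrefl] at h2
    rcases h2 with h2 | h2
    · omega
    · simp at h2
  · rfl
  · rfl

-- from pvAbs s x, the update condition of x against s is false
lemma pvAbs_cond (s : Option (List Int) × Int) (x : List Int × Int) (h : pvAbs s x) :
    ¬ (x.2 > s.2 ∨ (s.1.isSome ∧ x.2 = s.2 ∧ pvListGt x.1.reverse ((s.1.getD []).reverse) = true)) := by
  intro hc
  unfold pvAbs pvUpdB at h
  rw [if_pos (by simpa using hc)] at h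
  have h1 : some x.1 = s.1 := congrArg Prod.fst h
  rcases hc with hc | hc
  · have h2 : x.2 = s.2 := congrArg Prod.snd h
    omega
  · obtain ⟨_, _, hgt⟩ := hc
    rw [← h1] at hgt
    simp only [Option.getD_some] at hgt
    rw [pvListGt_irrefl] at hgt
    exact Bool.false_ne_true hgt

lemma pvAbs_upd (s : Option (List Int) × Int) (x y : List Int × Int) (h : pvAbs s x) :
    pvAbs (pvUpdB s y) x := by
  have hcx := pvAbs_cond s x h
  push Not at hcx
  unfold pvAbs pvUpdB
  split_ifs with h1 h2 h3
  · -- s replaced by (some y.1, y.2), yet x's condition against the new state held: impossible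
    exfalso
    simp only [Option.isSome_some, Option.getD_some] at h2
    rcases h1 with h1 | h1
    · rcases h2 with h2 | h2
      · omega
      · have := h2.2.1
        omega
    · obtain ⟨hsome, hy2, hygt⟩ := h1
      rcases Option.isSome_iff_exists.mp hsome with ⟨b, hb⟩
      rw [hb] at hygt
      simp only [Option.getD_some] at hygt
      have hxle : x.2 ≤ s.2 := hcx.1
      rcases h2 with h2 | h2
      · omega
      · obtain ⟨_, hx2, hxgt⟩ := h2
        have hxs : x.2 = s.2 := by omega
        have hnx := hcx.2 (by rw [hb]; rfl) hxs
        rw [hb] at hnx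
        simp only [Option.getD_some] at hnx
        exact hnx (pvListGt_trans _ _ _ hxgt hygt)
  · rfl
  · exfalso
    exact pvAbs_cond s x h (by simpa using h3)
  · rfl

lemma pvAbs_foldl (L : List (List Int × Int)) : ∀ s x, pvAbs s x → pvAbs (List.foldl pvUpdB s L) x := by
  induction L with
  | nil => intro s x h; exact h
  | cons y L ih => intro s x h; exact ih _ _ (pvAbs_upd s x y h)

lemma pvAll_abs (L : List (List Int × Int)) : ∀ s x, x ∈ L → pvAbs (List.foldl pvUpdB s L) x := by
  induction L with
  | nil => intro s x h; cases h
  | cons y L ih =>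
    intro s x h
    rcases List.mem_cons.mp h with h | h
    · subst h; exact pvAbs_foldl L _ _ (pvAbs_upd_self s x)
    · exact ih _ _ h

lemma pvFold_abs_id (L : List (List Int × Int)) : ∀ s, (∀ x ∈ L, pvAbs s x) → List.foldl pvUpdB s L = s := by
  induction L with
  | nil => intro s _; rfl
  | cons y L ih =>
    intro s h
    have hy : pvUpdB s y = s := h y (by simp)
    simp only [List.foldl_cons, hy]
    exact ih s (fun x hx => h x (by simp [hx]))

lemma pvFold_dup (L : List (List Int × Int)) (s : Option (List Int) × Int) :
    List.foldl pvUpdB (List.foldl pvUpdB s L) L = List.foldl pvUpdB s L :=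
  pvFold_abs_id L _ (fun x hx => pvAll_abs L s x hx)

-- pvInnerA preserves the result's length
lemma pvInnerA_len (info : List Int) : ∀ (c : List Bool) (i : Nat) st,
    (pvInnerA info c i st).1.length = (st.1 : List Int).length := by
  intro c
  induction c with
  | nil => intro i st; rfl
  | cons b rest ih =>
    intro i st
    obtain ⟨result, target, target2, n1⟩ := st
    simp only [pvInnerA]
    split_ifs <;> simp [ih, List.length_set]

lemma pvLeaf_len (info : List Int) (s1 : Int) (c : List Bool) (i : Nat) (rem lion lost : Int)
    (res : List Int) (h : res.length = 11) :
    (pvLeaf info s1 i rem lion lost res c).1.length = 11 := by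
  unfold pvLeaf
  have := pvInnerA_len info c i (res, s1 - lost, lion, rem)
  rcases heq : pvInnerA info c i (res, s1 - lost, lion, rem) with ⟨result, target, target2, n1⟩
  rw [heq] at this
  simp only []
  split_ifs <;> simp_all [List.length_set]

-- one step of the leaf function
lemma pvLeaf_cons (info : List Int) (s1 : Int) (b : Bool) (c : List Bool) (i : Nat)
    (rem lion lost : Int) (res : List Int) :
    pvLeaf info s1 i rem lion lost res (b :: c) =
      (if b then
        (let v := PySem.List.pyGetD info (i : Int) 0
         if v + 1 ≤ rem then
           pvLeaf info s1 (i + 1) (rem - (v + 1)) (lion + (10 - (i : Int)))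
             (lost + (if v > 0 then 10 - (i : Int) else 0)) (res.set i (v + 1)) c
         else pvLeaf info s1 (i + 1) rem lion lost res c)
      else pvLeaf info s1 (i + 1) rem lion lost res c) := by
  by_cases hb : b
  · subst hb
    have harith : (if PySem.List.pyGetD info (i : Int) 0 > 0
          then s1 - lost - (10 - (i : Int)) else s1 - lost) =
        s1 - (lost + (if PySem.List.pyGetD info (i : Int) 0 > 0 then 10 - (i : Int) else 0)) := by
      split_ifs <;> ring
    by_cases hf : PySem.List.pyGetD info (i : Int) 0 + 1 ≤ rem
    · simp only [pvLeaf, pvInnerA, if_true]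
      rw [harith]
      simp only [if_pos hf]
    · simp only [pvLeaf, pvInnerA, if_true]
      simp only [if_neg hf]
  · simp only [pvLeaf, pvInnerA]
    simp [hb]

lemma pvSet10 (res : List Int) (h : res.length = 11) (v : Int) :
    res.take 10 ++ [v] = res.set 10 v := by
  rw [List.set_eq_take_append_cons_drop, if_pos (by omega)]
  rw [List.drop_eq_nil_of_le (by omega)]

lemma pvSet10_zero (res : List Int) (h : res.length = 11) (h0 : res[10]? = some 0) :
    res.take 10 ++ [(0 : Int)] = res := by
  rw [pvSet10 res h 0]
  apply List.ext_getElem?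
  intro m
  rw [List.getElem?_set]
  by_cases hm : 10 = m
  · subst hm
    rw [if_pos rfl, if_pos (by omega)]
    exact h0.symm
  · rw [if_neg hm]

-- the main induction: B's dfs folds B's update over exactly A's per-combination leaves
lemma pvMain (info : List Int) (s1 : Int) : ∀ (k i : Nat), i + k = 10 →
    ∀ (rem lion lost : Int) (res : List Int) s, res.length = 11 → res[10]? = some 0 →
    pvDfs info s1 i rem lion lost res s =
      List.foldl pvUpdB s ((pvProd k).map (pvLeaf info s1 i rem lion lost res)) := by
  intro k
  induction k with
  | zero =>
    intro i hik rem lion lost res s hlen h10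
    have hi : i = 10 := by omega
    subst hi
    rw [pvDfs]
    rw [dif_neg (by omega)]
    have hleaf : pvLeaf info s1 10 rem lion lost res [] =
        (if rem > 0 then res.set 10 rem else res, lion - (s1 - lost)) := by
      simp [pvLeaf, pvInnerA]
    have hres10 : res.take 10 ++ [if rem > 0 then rem else 0] =
        (if rem > 0 then res.set 10 rem else res) := by
      split_ifs with hrem
      · exact pvSet10 res hlen rem
      · exact pvSet10_zero res hlen h10
    simp only [pvProd, List.map_cons, List.map_nil, List.foldl_cons, List.foldl_nil]
    rw [hleaf, hres10]
    rfl
  | succ k ih =>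
    intro i hik rem lion lost res s hlen h10
    have hi : i < 10 := by omega
    rw [pvDfs]
    rw [dif_pos hi]
    have hik' : (i + 1) + k = 10 := by omega
    have hlen' : (res.set i (PySem.List.pyGetD info (i : Int) 0 + 1)).length = 11 := by
      simp [hlen]
    have h10' : (res.set i (PySem.List.pyGetD info (i : Int) 0 + 1))[10]? = some 0 := by
      rw [List.getElem?_set_ne (by omega)]
      exact h10
    simp only [pvProd, List.map_append, List.map_map, List.foldl_append]
    by_cases hf : PySem.List.pyGetD info (i : Int) 0 + 1 ≤ rem
    · rw [if_pos hf]
      have hmapT : (pvProd k).map ((pvLeaf info s1 i rem lion lost res) ∘ (fun c => true :: c)) =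
          (pvProd k).map (pvLeaf info s1 (i + 1) (rem - (PySem.List.pyGetD info (i : Int) 0 + 1))
            (lion + (10 - (i : Int)))
            (lost + (if PySem.List.pyGetD info (i : Int) 0 > 0 then 10 - (i : Int) else 0))
            (res.set i (PySem.List.pyGetD info (i : Int) 0 + 1))) := by
        apply List.map_eq_map_iff.mpr
        intro c _
        simp only [Function.comp_apply]
        rw [pvLeaf_cons]
        simp only [if_true]
        rw [if_pos hf]
      have hmapF : (pvProd k).map ((pvLeaf info s1 i rem lion lost res) ∘ (fun c => false :: c)) =
          (pvProd k).map (pvLeaf info s1 (i + 1) rem lion lost res) := by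
        apply List.map_eq_map_iff.mpr
        intro c _
        simp only [Function.comp_apply]
        rw [pvLeaf_cons]
        simp
      rw [hmapT, hmapF]
      rw [ih (i + 1) hik' _ _ _ _ s hlen' h10']
      rw [ih (i + 1) hik' rem lion lost res _ hlen h10]
    · rw [if_neg hf]
      have hmapT : (pvProd k).map ((pvLeaf info s1 i rem lion lost res) ∘ (fun c => true :: c)) =
          (pvProd k).map (pvLeaf info s1 (i + 1) rem lion lost res) := by
        apply List.map_eq_map_iff.mpr
        intro c _
        simp only [Function.comp_apply]
        rw [pvLeaf_cons]
        simp only [if_true]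
        rw [if_neg hf]
      have hmapF : (pvProd k).map ((pvLeaf info s1 i rem lion lost res) ∘ (fun c => false :: c)) =
          (pvProd k).map (pvLeaf info s1 (i + 1) rem lion lost res) := by
        apply List.map_eq_map_iff.mpr
        intro c _
        simp only [Function.comp_apply]
        rw [pvLeaf_cons]
        simp
      rw [hmapT, hmapF]
      rw [ih (i + 1) hik' rem lion lost res s hlen h10]
      rw [pvFold_dup]

-- ===== VERDICT (by name: the statement is the Claim_ definition above) =====
lemma solution_eq (n : Int) (info : List Int) : solution n info = solution_alt n info := by
  unfold solution solution_alt
  rw [pvSum_eq]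
  set s1 := pvSumA info 0 0 with hs1
  have hstep : pvStepA n info s1 =
      fun st c => pvUpdA st (pvLeaf info s1 0 n 0 0 (List.replicate 11 0) c) := by
    funext st c
    unfold pvStepA pvLeaf
    rw [sub_zero]
  have hfold1 : List.foldl (pvStepA n info s1) ([], 1) (pvProd 10) =
      List.foldl pvUpdA ([], 1) ((pvProd 10).map (pvLeaf info s1 0 n 0 0 (List.replicate 11 0))) := by
    rw [List.foldl_map, hstep]
  have hlens : ∀ r ∈ (pvProd 10).map (pvLeaf info s1 0 n 0 0 (List.replicate 11 0)), r.1.length = 11 := by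
    intro r hrm
    rcases List.mem_map.mp hrm with ⟨c, _, hc⟩
    rw [← hc]
    exact pvLeaf_len info s1 c 0 n 0 0 (List.replicate 11 0) (by simp)
  have hok0 : pvOk ((none : Option (List Int)), (1 : Int)) := by
    intro b hb
    simp at hb
  have hAB := pvFoldAB ((pvProd 10).map (pvLeaf info s1 0 n 0 0 (List.replicate 11 0)))
    ((none : Option (List Int)), (1 : Int)) hok0 hlens
  have hmain := pvMain info s1 10 0 rfl n 0 0 (List.replicate 11 0)
    ((none : Option (List Int)), (1 : Int)) (by simp) (by simp)
  have hcnv0 : pvCnv ((none : Option (List Int)), (1 : Int)) = (([] : List Int), (1 : Int)) := rfl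
  rw [hfold1, ← hcnv0, hAB.1, ← hmain]
  have hokf : pvOk (pvDfs info s1 0 n 0 0 (List.replicate 11 0)
      ((none : Option (List Int)), (1 : Int))) := by
    rw [hmain]; exact hAB.2
  set rB := pvDfs info s1 0 n 0 0 (List.replicate 11 0) ((none : Option (List Int)), (1 : Int)) with hrB
  unfold pvFinA pvFinB
  cases hr : rB.1 with
  | none => simp [pvCnv, hr]
  | some a =>
    have ha : a.length = 11 := hokf a hr
    have hane : a ≠ [] := by intro hh; rw [hh] at ha; simp at ha
    simp [pvCnv, hr, hane]

-- ===== VERDICT (by name: the statement is the Claim_ definition above) =====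
theorem solution_spec : Claim_equal_solution := by
  intro n info _ _
  unfold Spec_solution
  exact solution_eq n info
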